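-- pv_equiv track=rewrite | github.com/pradyumnasagar/synthomics | genome_sonics/art.py | compute_dna_walk
-- ===== SOURCE A (Python) =====
-- from typing import Dict, List, Tuple, Optional
--
-- def compute_dna_walk(seq: str) -> Tuple[List[int], List[int]]:
--     """
--     Compute 2D DNA walk coordinates.
--
--     Mapping:
--         A → Up (+y)
--         T → Down (-y)
--         G → Right (+x)
--         C → Left (-x)
--
--     Args:
--         seq: DNA sequence
--
--     Returns:
--         (x_coords, y_coords) lists
--     """
--     x, y = 0, 0
--     xs, ys = [0], [0]
--
--     for nuc in seq.upper():
--         if nuc == 'A':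
--             y += 1
--         elif nuc == 'T':
--             y -= 1
--         elif nuc == 'G':
--             x += 1
--         elif nuc == 'C':
--             x -= 1
--         # N doesn't move
--
--         xs.append(x)
--         ys.append(y)
--
--     return xs, ys
-- ===== SOURCE B (Python) =====
-- _DELTA = {'A': (0, 1), 'T': (0, -1), 'G': (1, 0), 'C': (-1, 0)}
--
-- def compute_dna_walk(seq):
--     # Compute the walk's ENDPOINT first, directly from nucleotide counts,
--     # then reconstruct the path BACKWARDS from the endpoint, undoing one
--     # step at a time, and reverse the built lists at the end.
--     s = seq.upper()
--     x = s.count('G') - s.count('C')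
--     y = s.count('A') - s.count('T')
--     xs, ys = [x], [y]
--     for nuc in reversed(s):
--         dx, dy = _DELTA.get(nuc, (0, 0))
--         x -= dx
--         y -= dy
--         xs.append(x)
--         ys.append(y)
--     return xs[::-1], ys[::-1]
-- ===== Notes on version B (the rewrite author's own statement) =====
-- stated objective: alternative
-- what changed: B first computes the walk's endpoint in closed form from nucleotide counts (str.count), then reconstructs the path back-to-front by undoing one step at a time from the endpoint and reversing the lists, instead of A's forward pass threading running totals.
import Mathlib
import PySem

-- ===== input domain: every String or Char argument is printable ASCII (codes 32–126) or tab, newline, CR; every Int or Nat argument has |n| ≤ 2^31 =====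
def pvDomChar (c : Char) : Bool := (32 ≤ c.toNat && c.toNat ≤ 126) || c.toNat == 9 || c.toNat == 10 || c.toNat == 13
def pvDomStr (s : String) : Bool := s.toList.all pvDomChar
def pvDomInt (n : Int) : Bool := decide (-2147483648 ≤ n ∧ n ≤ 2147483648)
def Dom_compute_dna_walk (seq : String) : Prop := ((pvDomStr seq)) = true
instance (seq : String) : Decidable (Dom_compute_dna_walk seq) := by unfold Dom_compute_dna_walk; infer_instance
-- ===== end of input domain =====

-- B computes the endpoint from nucleotide counts and rebuilds the walk back-to-front (alternative decomposition, same cost).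

-- ===== PORT A =====
-- one iteration of A's if/elif chain: the updated (x, y) for one nucleotide
def pvStepA (x y : Int) (c : Char) : Int × Int :=
  if c = 'A' then (x, y + 1)
  else if c = 'T' then (x, y - 1)
  else if c = 'G' then (x + 1, y)
  else if c = 'C' then (x - 1, y)
  else (x, y)

-- A's loop: thread x, y forward, appending each new position to xs, ys
def pvLoopA : List Char → Int → Int → List Int → List Int → List Int × List Int
  | [], _, _, xs, ys => (xs, ys)
  | c :: rest, x, y, xs, ys =>
      let p := pvStepA x y c
      pvLoopA rest p.1 p.2 (xs ++ [p.1]) (ys ++ [p.2])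

def compute_dna_walk (seq : String) : List Int × List Int :=
  pvLoopA (PySem.Str.upper seq).toList 0 0 [0] [0]

-- ===== PORT B =====
def pvDeltaTable : PySem.Dict Char (Int × Int) :=
  PySem.Dict.mk [('A', (0, 1)), ('T', (0, -1)), ('G', (1, 0)), ('C', (-1, 0))]

-- Source B's backward loop: undo one step per nucleotide (read right-to-left), appending each earlier position
def pvLoopB : List Char → Int → Int → List Int → List Int → List Int × List Int
  | [], _, _, xs, ys => (xs, ys)
  | c :: rest, x, y, xs, ys =>
      let d := PySem.Dict.getD pvDeltaTable c (0, 0)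
      pvLoopB rest (x - d.1) (y - d.2) (xs ++ [x - d.1]) (ys ++ [y - d.2])

-- Source B: endpoint from counts, then walk backwards from it, then reverse ([::-1])
def compute_dna_walk_alt (seq : String) : List Int × List Int :=
  let s := PySem.Str.upper seq
  let x : Int := (PySem.Str.count s "G" : Int) - (PySem.Str.count s "C" : Int)
  let y : Int := (PySem.Str.count s "A" : Int) - (PySem.Str.count s "T" : Int)
  let p := pvLoopB s.toList.reverse x y [x] [y]
  (p.1.reverse, p.2.reverse)

-- ===== PRECONDITION & SPEC =====
def Spec_compute_dna_walk (seq : String) (out : List Int × List Int) : Prop := out = compute_dna_walk_alt seq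
instance (seq : String) (out : List Int × List Int) : Decidable (Spec_compute_dna_walk seq out) := by unfold Spec_compute_dna_walk; infer_instance

-- ===== CLAIM (what is proved, stated in full; the proofs are below) =====
def Claim_equal_compute_dna_walk : Prop := ∀ (seq : String), Dom_compute_dna_walk seq → Spec_compute_dna_walk seq (compute_dna_walk seq)

-- ===== LEMMAS AND PROOFS =====

-- the delta table's lookup, written out
theorem pvDelta_closed (c : Char) :
    PySem.Dict.getD pvDeltaTable c (0, 0) =
      if c = 'A' then ((0 : Int), (1 : Int)) else if c = 'T' then (0, -1)
      else if c = 'G' then (1, 0) else if c = 'C' then (-1, 0) else (0, 0) := by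
  simp only [pvDeltaTable, PySem.Dict.getD_eq_get?_getD, PySem.Dict.get?_mk_cons]
  split_ifs <;> simp_all [PySem.Dict.get?] <;> subst_vars <;> simp_all

-- A's branch chain computes exactly "add the looked-up delta"
theorem pvStepA_eq_delta (x y : Int) (c : Char) :
    pvStepA x y c = (x + (PySem.Dict.getD pvDeltaTable c (0, 0)).1,
                     y + (PySem.Dict.getD pvDeltaTable c (0, 0)).2) := by
  rw [pvStepA, pvDelta_closed]; split_ifs <;> simp <;> ring

-- head b followed by the tail of scanl is scanl itself
theorem scanl_head_tail (b : Int) (l : List Int) :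
    b :: (List.scanl (· + ·) b l).tail = List.scanl (· + ·) b l := by
  cases l <;> simp

theorem scanl_sub_head_tail (b : Int) (l : List Int) :
    b :: (List.scanl (· - ·) b l).tail = List.scanl (· - ·) b l := by
  cases l <;> simp

-- A's loop appends exactly the (tail of the) forward prefix sums of the deltas
theorem pvLoopA_eq_scanl (cs : List Char) : ∀ (x y : Int) (xs ys : List Int),
    pvLoopA cs x y xs ys =
      (xs ++ (List.scanl (· + ·) x (cs.map (fun c => (PySem.Dict.getD pvDeltaTable c (0, 0)).1))).tail,
       ys ++ (List.scanl (· + ·) y (cs.map (fun c => (PySem.Dict.getD pvDeltaTable c (0, 0)).2))).tail) := by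
  induction cs with
  | nil => intro x y xs ys; simp [pvLoopA]
  | cons c rest ih =>
      intro x y xs ys
      rw [pvLoopA]
      simp only [pvStepA_eq_delta, ih, List.map_cons, List.scanl_cons, List.tail_cons]
      conv_rhs => rw [← scanl_head_tail, ← scanl_head_tail]
      simp [List.append_assoc, scanl_head_tail]

-- B's loop appends exactly the (tail of the) backward running differences of the deltas
theorem pvLoopB_eq_scanl (cs : List Char) : ∀ (x y : Int) (xs ys : List Int),
    pvLoopB cs x y xs ys =
      (xs ++ (List.scanl (· - ·) x (cs.map (fun c => (PySem.Dict.getD pvDeltaTable c (0, 0)).1))).tail,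
       ys ++ (List.scanl (· - ·) y (cs.map (fun c => (PySem.Dict.getD pvDeltaTable c (0, 0)).2))).tail) := by
  induction cs with
  | nil => intro x y xs ys; simp [pvLoopB]
  | cons c rest ih =>
      intro x y xs ys
      rw [pvLoopB]
      simp only [ih, List.map_cons, List.scanl_cons, List.tail_cons]
      conv_rhs => rw [← scanl_sub_head_tail, ← scanl_sub_head_tail]
      simp [List.append_assoc, scanl_sub_head_tail]

-- Chars.count with a single-character needle is List.count (fuel-indexed helper)
theorem pvGo_single (c : Char) : ∀ (fuel : Nat) (s : List Char) (acc : Nat), s.length ≤ fuel →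
    PySem.Chars.count.go [c] fuel s acc = acc + s.count c := by
  intro fuel
  induction fuel with
  | zero => intro s acc h; cases s with
    | nil => simp [PySem.Chars.count.go]
    | cons a t => simp at h
  | succ n ih => intro s acc h; cases s with
    | nil => simp [PySem.Chars.count.go]
    | cons a t =>
      simp only [PySem.Chars.count.go]
      by_cases hc : c = a
      · subst hc
        simp [List.isPrefixOf, ih t (acc + 1) (by simpa using h)]
        omega
      · have hp : [c].isPrefixOf (a :: t) = false := by
          simp [List.isPrefixOf]; exact fun h' => hc h'
        simp [hp, ih t acc (by simpa using h), List.count_cons]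
        intro h'; exact absurd h'.symm hc

theorem pvCount_single (cs : List Char) (c : Char) : PySem.Chars.count cs [c] = cs.count c := by
  simp [PySem.Chars.count, pvGo_single c cs.length cs 0 le_rfl]

-- the count-based endpoint equals the sum of the x-deltas
theorem pvSum_dx (cs : List Char) :
    (cs.map (fun c => (PySem.Dict.getD pvDeltaTable c (0, 0)).1)).sum =
      (cs.count 'G' : Int) - (cs.count 'C' : Int) := by
  induction cs with
  | nil => simp
  | cons a t ih =>
      rw [List.map_cons, List.sum_cons, ih, pvDelta_closed]
      split_ifs <;> simp_all <;> ring

-- the count-based endpoint equals the sum of the y-deltas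
theorem pvSum_dy (cs : List Char) :
    (cs.map (fun c => (PySem.Dict.getD pvDeltaTable c (0, 0)).2)).sum =
      (cs.count 'A' : Int) - (cs.count 'T' : Int) := by
  induction cs with
  | nil => simp
  | cons a t ih =>
      rw [List.map_cons, List.sum_cons, ih, pvDelta_closed]
      split_ifs <;> simp_all <;> ring

theorem pvScanl_snoc (f : Int → Int → Int) (b a : Int) (u : List Int) :
    List.scanl f b (u ++ [a]) = List.scanl f b u ++ [f (u.foldl f b) a] := by
  induction u generalizing b with
  | nil => simp
  | cons x t ih => simp [List.scanl_cons, ih]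

theorem pvFoldl_sub (c : Int) (u : List Int) : u.foldl (· - ·) c = c - u.sum := by
  induction u generalizing c with
  | nil => simp
  | cons x t ih => simp [ih]; ring

-- reversing a forward prefix-sum scan gives the backward difference scan from the total
theorem pvScanl_add_reverse (l : List Int) : ∀ c : Int,
    (List.scanl (· + ·) c l).reverse = List.scanl (· - ·) (c + l.sum) l.reverse := by
  induction l with
  | nil => simp
  | cons a t ih =>
      intro c
      simp only [List.scanl_cons, List.reverse_cons]
      rw [pvScanl_snoc, ih (c + a), pvFoldl_sub]
      simp [List.sum_cons]
      constructor
      · ring_nf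
      · ring_nf

-- ===== VERDICT (by name: the statement is the Claim_ definition above) =====
theorem compute_dna_walk_spec : Claim_equal_compute_dna_walk := by
  intro seq _
  unfold Spec_compute_dna_walk
  dsimp only [compute_dna_walk, compute_dna_walk_alt]
  rw [pvLoopA_eq_scanl, pvLoopB_eq_scanl]
  have hG : ((PySem.Str.count (PySem.Str.upper seq) "G" : Nat) : Int)
      - ((PySem.Str.count (PySem.Str.upper seq) "C" : Nat) : Int)
      = ((PySem.Str.upper seq).toList.map (fun c => (PySem.Dict.getD pvDeltaTable c (0, 0)).1)).sum := by
    rw [pvSum_dx]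
    simp [PySem.Str.count, pvCount_single]
  have hA : ((PySem.Str.count (PySem.Str.upper seq) "A" : Nat) : Int)
      - ((PySem.Str.count (PySem.Str.upper seq) "T" : Nat) : Int)
      = ((PySem.Str.upper seq).toList.map (fun c => (PySem.Dict.getD pvDeltaTable c (0, 0)).2)).sum := by
    rw [pvSum_dy]
    simp [PySem.Str.count, pvCount_single]
  simp only [hG, hA, List.map_reverse]
  ext1
  · simp only [List.singleton_append, scanl_head_tail, scanl_sub_head_tail]
    rw [← zero_add (List.sum _), ← pvScanl_add_reverse, List.reverse_reverse]
  · simp only [List.singleton_append, scanl_head_tail, scanl_sub_head_tail]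
    rw [← zero_add (List.sum _), ← pvScanl_add_reverse, List.reverse_reverse]
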